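-- pv_equiv track=rewrite | github.com/RaghavGupta23/cs166 | lab02/decrypt.py | freqtest
-- ===== SOURCE A (Python) =====
-- import collections
--
-- def freqtest(string):
--     """ Frequency analysis. Most common char needs to be in ETAOINSHRDLU. If most common char is a tie, at least one has to intersect. """
--     commonletters = ['E', 'T', 'A', 'O', 'I', 'N', 'S', 'H', 'R', 'D', 'L', 'U']
--     commonbytes = []
--     for c in commonletters:
--         commonbytes.append(str.encode(c))
--
--     common = collections.Counter(string.replace(' ', '')).most_common()
--     freq = common[0][1]
--     letters = [c[0] for c in common if c[1] == freq]
--     if set(letters) & set(commonletters):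
--         return True
--     else:
--         return False
-- ===== SOURCE B (Python) =====
-- from itertools import groupby
--
-- def freqtest(string):
--     """ Frequency analysis via sort + run-length grouping instead of Counter. """
--     COMMON = ['E', 'T', 'A', 'O', 'I', 'N', 'S', 'H', 'R', 'D', 'L', 'U']
--     chars = sorted(string.replace(' ', ''))
--     runs = [(ch, sum(1 for _ in grp)) for ch, grp in groupby(chars)]
--     maxfreq = sorted(runs, key=lambda p: p[1], reverse=True)[0][1]
--     return any(cnt == maxfreq and ch in COMMON for ch, cnt in runs)
-- ===== Notes on version B (the rewrite author's own statement) =====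
-- stated objective: alternative
-- what changed: Replaces Counter + most_common hashing with sorting the characters, run-length grouping via itertools.groupby, and an any() scan over the runs for a tied common letter.
import Mathlib
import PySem

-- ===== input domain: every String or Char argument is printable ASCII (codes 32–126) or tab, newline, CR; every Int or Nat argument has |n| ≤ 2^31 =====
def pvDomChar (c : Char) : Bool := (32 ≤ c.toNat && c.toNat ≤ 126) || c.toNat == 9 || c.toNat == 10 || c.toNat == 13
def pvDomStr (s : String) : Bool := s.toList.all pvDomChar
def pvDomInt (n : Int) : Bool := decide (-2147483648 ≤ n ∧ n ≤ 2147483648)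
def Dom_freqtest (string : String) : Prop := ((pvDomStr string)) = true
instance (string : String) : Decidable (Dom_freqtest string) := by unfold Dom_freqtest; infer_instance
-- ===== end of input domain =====

-- B replaces Counter/most_common hashing by sort + run-length grouping; equivalence is proved on strings with a non-space char (A raises IndexError otherwise).

-- ===== PORT A =====
def freqtest (string : String) : Bool :=
  let commonletters : List Char := ['E', 'T', 'A', 'O', 'I', 'N', 'S', 'H', 'R', 'D', 'L', 'U']
  let common := PySem.List.sorted (PySem.Dict.counter (PySem.Str.replace string " " "").toList).items (fun p => p.2) true
  match PySem.List.pyGet? common 0 with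
  | none => false   -- Python raises IndexError here; excluded by Pre_freqtest
  | some p0 =>
    let freq := p0.2
    let letters := (common.filter (fun c => c.2 == freq)).map (fun c => c.1)
    if PySem.Set.inter (PySem.Set.ofList letters) (PySem.Set.ofList commonletters) ≠ [] then true else false

-- ===== PORT B =====
-- itertools.groupby over a sorted char list, as run-length pairs (hand-ported, exact)
def pvRuns : List Char → List (Char × Int)
  | [] => []
  | c :: t => (c, 1 + ((t.takeWhile (· == c)).length : Int)) :: pvRuns (t.dropWhile (· == c))
  termination_by l => l.length
  decreasing_by
    have := List.length_dropWhile_le (· == c) t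
    simp only [List.length_cons]; omega

def freqtest_alt (string : String) : Bool :=
  let COMMON : List Char := ['E', 'T', 'A', 'O', 'I', 'N', 'S', 'H', 'R', 'D', 'L', 'U']
  let chars := PySem.List.sorted (PySem.Str.replace string " " "").toList (fun c => c) false
  let runs := pvRuns chars
  match PySem.List.pyGet? (PySem.List.sorted runs (fun p => p.2) true) 0 with
  | none => false   -- IndexError in Source B as well; excluded by Pre_freqtest
  | some p0 => runs.any (fun p => p.2 == p0.2 && COMMON.contains p.1)

-- ===== PRECONDITION & SPEC =====
-- Pre_ excludes exactly the strings consisting only of spaces (including ""), on which A raises IndexError.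
def Pre_freqtest (string : String) : Prop := string.toList.any (fun c => c ≠ ' ') = true
instance (string : String) : Decidable (Pre_freqtest string) := by unfold Pre_freqtest; infer_instance
def pvWitness_freqtest : String := "ee t"

def Spec_freqtest (string : String) (out : Bool) : Prop := out = freqtest_alt string
instance (string : String) (out : Bool) : Decidable (Spec_freqtest string out) := by unfold Spec_freqtest; infer_instance

-- ===== CLAIM (what is proved, stated in full; the proofs are below) =====
def Claim_equal_freqtest : Prop := ∀ (string : String), Dom_freqtest string → Pre_freqtest string → Spec_freqtest string (freqtest string)

-- ===== LEMMAS AND PROOFS =====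

-- s.replace(' ', '') removes exactly the spaces
lemma pv_replace_go_single (c0 : Char) : ∀ (fuel : Nat) (l acc : List Char), l.length ≤ fuel →
    PySem.Chars.replace.go [c0] [] fuel l acc = acc.reverse ++ l.filter (· != c0) := by
  intro fuel
  induction fuel with
  | zero =>
    intro l acc h
    have : l = [] := List.eq_nil_of_length_eq_zero (Nat.le_zero.mp h)
    subst this
    simp [PySem.Chars.replace.go]
  | succ n ih =>
    intro l acc h
    cases l with
    | nil => simp [PySem.Chars.replace.go]
    | cons c t =>
      by_cases hc : c = c0
      · subst hc
        have hpre : [c].isPrefixOf (c :: t) = true := by simp [List.isPrefixOf]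
        rw [PySem.Chars.replace.go]
        simp only [hpre, if_pos, List.length_cons, List.length_nil, Nat.zero_add,
          List.drop_succ_cons, List.drop_zero, List.reverse_nil, List.nil_append]
        rw [ih t acc (by simpa using h)]
        simp
      · have hpre : [c0].isPrefixOf (c :: t) = false := by
          simp [List.isPrefixOf]
          exact fun hh => (hc hh.symm).elim
        rw [PySem.Chars.replace.go]
        simp only [hpre]
        rw [ih t (c :: acc) (by simpa using h)]
        simp [hc]

lemma pv_replace_space (s : String) :
    (PySem.Str.replace s " " "").toList = s.toList.filter (· != ' ') := by
  have : PySem.Chars.replace s.toList [' '] [] = s.toList.filter (· != ' ') := by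
    rw [PySem.Chars.replace]
    simp only [List.isEmpty_cons, Bool.false_eq_true, if_false]
    exact pv_replace_go_single ' ' s.toList.length s.toList [] (le_refl _)
  simpa [PySem.Str.replace] using this

-- everything after the first run of c's in a sorted list is strictly above c
lemma pv_dropWhile_gt (c : Char) (t : List Char) (ht : t.Pairwise (· ≤ ·))
    (hle : ∀ x ∈ t, c ≤ x) : ∀ x ∈ t.dropWhile (· == c), c < x := by
  cases hdw : t.dropWhile (· == c) with
  | nil => simp
  | cons d ds =>
    intro x hx
    have hdne : (d == c) = false := by
      have hne : t.dropWhile (· == c) ≠ [] := by rw [hdw]; simp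
      have := List.head_dropWhile_not (· == c) hne
      simpa [hdw] using this
    have hdmem : d ∈ t := (List.dropWhile_sublist _).subset (by rw [hdw]; exact List.mem_cons_self ..)
    have hcd : c < d := lt_of_le_of_ne (hle d hdmem)
      (fun h => by simp [h.symm] at hdne)
    have hpw : (t.dropWhile (· == c)).Pairwise (· ≤ ·) := List.Pairwise.sublist (List.dropWhile_sublist _) ht
    rw [hdw] at hpw
    rcases List.mem_cons.mp hx with rfl | hx'
    · exact hcd
    · exact lt_of_lt_of_le hcd ((List.pairwise_cons.mp hpw).1 x hx')

-- each run of pvRuns on a sorted list is (c, multiplicity of c)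
lemma pvRuns_mem : ∀ (l : List Char), l.Pairwise (· ≤ ·) →
    ∀ p ∈ pvRuns l, p.1 ∈ l ∧ p.2 = (l.count p.1 : Int) := by
  intro l
  induction l using pvRuns.induct with
  | case1 => simp [pvRuns]
  | case2 c t ih =>
    intro hl p hp
    obtain ⟨hle, ht⟩ := List.pairwise_cons.mp hl
    have hgt := pv_dropWhile_gt c t ht hle
    have htw : ∀ x ∈ t.takeWhile (· == c), x = c := fun x hx => by
      simpa using List.mem_takeWhile_imp hx
    have hsplit : t.takeWhile (· == c) ++ t.dropWhile (· == c) = t :=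
      List.takeWhile_append_dropWhile
    rw [pvRuns] at hp
    rcases List.mem_cons.mp hp with rfl | hp'
    · refine ⟨List.mem_cons_self .., ?_⟩
      have h2 : t.count c = (t.takeWhile (· == c)).count c + (t.dropWhile (· == c)).count c := by
        conv_lhs => rw [← hsplit]
        exact List.count_append ..
      have h3 : (t.takeWhile (· == c)).count c = (t.takeWhile (· == c)).length := by
        rw [List.count_eq_length]
        intro b hb
        simp [htw b hb]
      have h4 : (t.dropWhile (· == c)).count c = 0 := by
        rw [List.count_eq_zero]
        intro hc
        exact lt_irrefl c (hgt c hc)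
      have h1 : (c :: t).count c = (t.takeWhile (· == c)).length + 1 := by
        rw [List.count_cons_self, h2, h3, h4]
      simp only [h1]
      push_cast
      ring
    · have hdwpw : (t.dropWhile (· == c)).Pairwise (· ≤ ·) := List.Pairwise.sublist (List.dropWhile_sublist _) ht
      obtain ⟨hmem, hcount⟩ := ih hdwpw p hp'
      have hp1 : c < p.1 := hgt _ hmem
      refine ⟨List.mem_cons_of_mem _ ((List.dropWhile_sublist _).subset hmem), ?_⟩
      have hceq : (c :: t).count p.1 = (t.dropWhile (· == c)).count p.1 := by
        rw [List.count_cons_of_ne (ne_of_gt hp1).symm]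
        conv_lhs => rw [← hsplit]
        rw [List.count_append]
        have h0 : (t.takeWhile (· == c)).count p.1 = 0 := by
          rw [List.count_eq_zero]
          intro hmem'
          exact (ne_of_gt hp1) (htw _ hmem')
        omega
      rw [hcount, hceq]

-- every element of l heads some run of pvRuns l
lemma pvRuns_cover : ∀ (l : List Char), ∀ c ∈ l, ∃ p ∈ pvRuns l, p.1 = c := by
  intro l
  induction l using pvRuns.induct with
  | case1 => simp
  | case2 c t ih =>
    intro x hx
    rcases List.mem_cons.mp hx with rfl | hx'
    · exact ⟨_, by rw [pvRuns]; exact List.mem_cons_self .., rfl⟩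
    · have hx2 : x ∈ t.takeWhile (· == c) ++ t.dropWhile (· == c) := by
        rw [List.takeWhile_append_dropWhile]; exact hx'
      rcases List.mem_append.mp hx2 with htw | hdw
      · have : x = c := by simpa using List.mem_takeWhile_imp htw
        subst this
        exact ⟨_, by rw [pvRuns]; exact List.mem_cons_self .., rfl⟩
      · obtain ⟨p, hp, hpe⟩ := ih x hdw
        exact ⟨p, by rw [pvRuns]; exact List.mem_cons_of_mem _ hp, hpe⟩

-- ===== VERDICT (by name: the statement is the Claim_ definition above) =====
set_option maxHeartbeats 2000000 in
theorem freqtest_spec : Claim_equal_freqtest := by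
  intro string _ hpre
  unfold Spec_freqtest
  rw [freqtest, freqtest_alt]
  simp only []
  set s : List Char := (PySem.Str.replace string " " "").toList with hsdef
  have hs : s ≠ [] := by
    rw [hsdef, pv_replace_space string]
    obtain ⟨c, hc, hcne⟩ := List.any_eq_true.mp hpre
    intro h
    have hmem : c ∈ string.toList.filter (· != ' ') :=
      List.mem_filter.mpr ⟨hc, by simpa using hcne⟩
    rw [h] at hmem
    simp at hmem
  clear hpre hsdef
  -- shared data
  have hitems : (PySem.Dict.counter s).items
      = List.map (fun k => (k, (List.count k s : Int))) (PySem.Set.ofList s) :=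
    PySem.Dict.items_counter s
  obtain ⟨c0, hc0⟩ := List.exists_mem_of_ne_nil s hs
  have hitemsne : (PySem.Dict.counter s).items ≠ [] := by
    rw [hitems]
    intro h
    rw [List.map_eq_nil_iff] at h
    have : c0 ∈ PySem.Set.ofList s := (PySem.Set.mem_ofList s c0).mpr hc0
    rw [h] at this
    simp at this
  set sa := PySem.List.sorted (PySem.Dict.counter s).items (fun p => p.2) true with hsa
  have hsane : sa ≠ [] := fun h => hitemsne ((PySem.List.sorted_eq_nil_iff _ _ _).mp (hsa ▸ h))
  obtain ⟨a, as, hA⟩ := List.exists_cons_of_ne_nil hsane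
  set ch := PySem.List.sorted s (fun c => c) false with hch
  have hchpw : ch.Pairwise (· ≤ ·) := by
    have := PySem.List.sorted_pairwise s (fun c => c)
    rw [hch]
    simpa using this
  set rs := pvRuns ch with hrs
  have hchne : ch ≠ [] := fun h => hs ((PySem.List.sorted_eq_nil_iff _ _ _).mp (hch ▸ h))
  have hrsne : rs ≠ [] := by
    rw [hrs]
    cases hh : ch with
    | nil => exact absurd hh hchne
    | cons x xs => simp [pvRuns]
  set sb := PySem.List.sorted rs (fun p => p.2) true with hsb
  have hsbne : sb ≠ [] := fun h => hrsne ((PySem.List.sorted_eq_nil_iff _ _ _).mp (hsb ▸ h))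
  obtain ⟨b, bs, hB⟩ := List.exists_cons_of_ne_nil hsbne
  -- membership characterisations
  have hItem : ∀ p : Char × Int, p ∈ (PySem.Dict.counter s).items
      ↔ (p.1 ∈ s ∧ p.2 = (List.count p.1 s : Int)) := by
    intro p
    rw [hitems, List.mem_map]
    constructor
    · rintro ⟨k, hk, rfl⟩
      exact ⟨(PySem.Set.mem_ofList s k).mp hk, rfl⟩
    · rintro ⟨h1, h2⟩
      refine ⟨p.1, (PySem.Set.mem_ofList s p.1).mpr h1, ?_⟩
      rw [← h2]
  have hRs : ∀ p ∈ rs, p.1 ∈ s ∧ p.2 = (List.count p.1 s : Int) := by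
    intro p hp
    obtain ⟨h1, h2⟩ := pvRuns_mem ch hchpw p (hrs ▸ hp)
    refine ⟨(PySem.List.mem_sorted s (fun c => c) false p.1).mp (hch ▸ h1), ?_⟩
    rw [h2, hch]
    congr 1
    exact (PySem.List.sorted_perm s (fun c => c) false).count_eq p.1
  have hCover : ∀ c ∈ s, ∃ p ∈ rs, p.1 = c := by
    intro c hc
    have := pvRuns_cover ch c ((PySem.List.mem_sorted s (fun c => c) false c).mpr hc)
    rw [← hrs] at this
    exact this
  -- the two heads carry the same (maximal) frequency
  have hAmax : ∀ y ∈ (PySem.Dict.counter s).items, y.2 ≤ a.2 :=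
    PySem.List.key_head_sorted_rev_ge _ _ (hsa.symm.trans hA)
  have hBmax : ∀ y ∈ rs, y.2 ≤ b.2 :=
    PySem.List.key_head_sorted_rev_ge _ _ (hsb.symm.trans hB)
  have haMem : a ∈ (PySem.Dict.counter s).items :=
    (PySem.List.mem_sorted _ _ _ a).mp (hsa ▸ hA ▸ List.mem_cons_self ..)
  have hbMem : b ∈ rs :=
    (hsb ▸ PySem.List.mem_sorted rs (fun p => p.2) true b).mp (hB ▸ List.mem_cons_self ..)
  have hab : a.2 = b.2 := by
    apply le_antisymm
    · obtain ⟨ha1, ha2⟩ := (hItem a).mp haMem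
      obtain ⟨p, hp, hpe⟩ := hCover a.1 ha1
      have hpv : p.2 = a.2 := by
        rw [(hRs p hp).2, hpe, ← ha2]
      rw [← hpv]
      exact hBmax p hp
    · obtain ⟨hb1, hb2⟩ := hRs b hbMem
      have hin : (b.1, (List.count b.1 s : Int)) ∈ (PySem.Dict.counter s).items :=
        (hItem _).mpr ⟨hb1, rfl⟩
      have := hAmax _ hin
      rw [← hb2] at this
      exact this
  -- evaluate the two head lookups and reduce the matches
  rw [hA, hB]
  simp only [show ∀ (x : Char × Int) (xs : List (Char × Int)),
      PySem.List.pyGet? (x :: xs) (0 : Int) = some x from fun x xs => by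
        simp [PySem.List.pyGet?, PySem.List.pyIdx?]]
  rw [Bool.eq_iff_iff]
  constructor
  · intro hL
    split_ifs at hL with hcond
    · obtain ⟨x, hx⟩ := List.exists_mem_of_ne_nil _ hcond
      obtain ⟨hx1, hx2⟩ := (PySem.Set.mem_inter _ _ x).mp hx
      have hx1' := (PySem.Set.mem_ofList _ x).mp hx1
      have hx2' := (PySem.Set.mem_ofList _ x).mp hx2
      obtain ⟨q, hq, rfl⟩ := List.mem_map.mp hx1'
      obtain ⟨hqsa, hqf⟩ := List.mem_filter.mp hq
      have hqv : q.2 = a.2 := by simpa using hqf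
      have hqmem : q ∈ (PySem.Dict.counter s).items :=
        (PySem.List.mem_sorted _ _ _ q).mp (hsa ▸ hA ▸ hqsa)
      obtain ⟨hq1, hq2⟩ := (hItem q).mp hqmem
      obtain ⟨p, hp, hpe⟩ := hCover q.1 hq1
      rw [List.any_eq_true]
      refine ⟨p, hp, ?_⟩
      have hpv : p.2 = b.2 := by
        rw [(hRs p hp).2, hpe, ← hq2, hqv, hab]
      simp [hpv, hpe, hx2']
  · intro hR
    obtain ⟨p, hp, hpv⟩ := List.any_eq_true.mp hR
    simp only [Bool.and_eq_true, beq_iff_eq] at hpv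
    obtain ⟨hpv2, hpc⟩ := hpv
    obtain ⟨hp1, hp2⟩ := hRs p hp
    have hqmem : (p.1, (List.count p.1 s : Int)) ∈ (PySem.Dict.counter s).items :=
      (hItem _).mpr ⟨hp1, rfl⟩
    have hqsa : (p.1, (List.count p.1 s : Int)) ∈ (a :: as) := by
      rw [← hA, hsa]
      exact (PySem.List.mem_sorted _ _ _ _).mpr hqmem
    have hfl : (p.1, (List.count p.1 s : Int)) ∈ (a :: as).filter (fun c => c.2 == a.2) := by
      refine List.mem_filter.mpr ⟨hqsa, ?_⟩
      simp only [beq_iff_eq]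
      rw [← hp2, hpv2, hab]
    have hxl : p.1 ∈ ((a :: as).filter (fun c => c.2 == a.2)).map (fun c => c.1) :=
      List.mem_map.mpr ⟨_, hfl, rfl⟩
    have hxin : p.1 ∈ PySem.Set.inter
        (PySem.Set.ofList (((a :: as).filter (fun c => c.2 == a.2)).map (fun c => c.1)))
        (PySem.Set.ofList ['E', 'T', 'A', 'O', 'I', 'N', 'S', 'H', 'R', 'D', 'L', 'U']) :=
      (PySem.Set.mem_inter _ _ _).mpr
        ⟨(PySem.Set.mem_ofList _ _).mpr hxl,
         (PySem.Set.mem_ofList _ _).mpr (by simpa using hpc)⟩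
    rw [if_pos (List.ne_nil_of_mem hxin)]
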